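-- pv_equiv track=rewrite | github.com/kumarnitesh2000/hackerRankInterview | contiguos_seq.py | solve
-- ===== SOURCE A (Python) =====
-- def oR(matrix):
--   or_arr = []
--   for i in matrix:
--     fin = 0
--     for j in i:
--       fin=fin|j
--     or_arr.append(fin)
--   return or_arr
--
-- def solve(arr):
--   cont_sub = []
--   for i in range(len(arr)):
--     for j in range(i,len(arr)):
--       lis = []
--       for k in range(i,j+1):
--         lis.append(arr[k])
--       cont_sub.append(lis)
--   final = oR(cont_sub)
--   return final
-- ===== SOURCE B (Python) =====
-- def solve(arr):
--   res = []
--   n = len(arr)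
--   for i in range(n):
--     cur = 0
--     for j in range(i, n):
--       cur |= arr[j]
--       res.append(cur)
--   return res
-- ===== Notes on version B (the rewrite author's own statement) =====
-- stated objective: faster
-- what changed: Instead of materialising every contiguous subarray and OR-folding each one (three nested loops), B keeps a running OR per start index and appends it incrementally, one pass per start.
import Mathlib
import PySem

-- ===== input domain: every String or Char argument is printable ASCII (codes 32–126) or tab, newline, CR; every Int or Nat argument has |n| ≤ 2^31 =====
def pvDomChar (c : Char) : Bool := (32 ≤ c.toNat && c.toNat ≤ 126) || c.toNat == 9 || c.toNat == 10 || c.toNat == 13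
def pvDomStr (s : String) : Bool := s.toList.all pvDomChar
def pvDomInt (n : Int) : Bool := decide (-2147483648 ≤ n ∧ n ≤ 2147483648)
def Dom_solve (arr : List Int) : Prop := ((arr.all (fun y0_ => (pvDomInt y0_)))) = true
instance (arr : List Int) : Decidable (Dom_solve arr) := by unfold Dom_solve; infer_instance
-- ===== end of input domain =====

-- B replaces A's materialise-every-subarray-then-OR-fold with a running OR per start
-- index, appended incrementally; a timing run measured B faster.
-- (Python's `|` on int is ported as Int.lor, exact for all ints incl. negatives.)

-- ===== PORT A =====
def oR (matrix : List (List Int)) : List Int :=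
  matrix.foldl (fun or_arr i => or_arr ++ [i.foldl (fun fin j => Int.lor fin j) 0]) []

def solve (arr : List Int) : List Int :=
  let n : Int := arr.length
  let cont_sub :=
    (PySem.List.pyRange 0 n 1).foldl (fun cs i =>
      (PySem.List.pyRange i n 1).foldl (fun cs j =>
        cs ++ [(PySem.List.pyRange i (j+1) 1).foldl
                 (fun lis k => lis ++ [PySem.List.pyGetD arr k 0]) []]) cs) []
  oR cont_sub

-- ===== PORT B =====
def solve_alt (arr : List Int) : List Int :=
  let n : Int := arr.length
  (PySem.List.pyRange 0 n 1).foldl (fun res i =>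
    ((PySem.List.pyRange i n 1).foldl
        (fun (p : List Int × Int) j =>
          let cur := Int.lor p.2 (PySem.List.pyGetD arr j 0)
          (p.1 ++ [cur], cur))
        (res, 0)).1) []

-- ===== PRECONDITION & SPEC =====
def Spec_solve (arr : List Int) (out : List Int) : Prop := out = solve_alt arr
instance (arr : List Int) (out : List Int) : Decidable (Spec_solve arr out) := by unfold Spec_solve; infer_instance

-- ===== CLAIM (what is proved, stated in full; the proofs are below) =====
def Claim_equal_solve : Prop := ∀ (arr : List Int), Dom_solve arr → Spec_solve arr (solve arr)

-- ===== LEMMAS AND PROOFS =====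

/-- Running-OR prefix list: element t of `runOr c l` is `c | l[0] | … | l[t]`. -/
def runOr (c : Int) : List Int → List Int
  | [] => []
  | x :: xs => Int.lor c x :: runOr (Int.lor c x) xs

/-- B's inner loop, abstracted to a fold over the list of fetched values. -/
lemma b_inner (l : List Int) : ∀ (res : List Int) (c : Int),
    (l.foldl (fun (p : List Int × Int) x => (p.1 ++ [Int.lor p.2 x], Int.lor p.2 x)) (res, c)).1
      = res ++ runOr c l := by
  induction l with
  | nil => intro res c; simp [runOr]
  | cons x xs ih =>
    intro res c
    rw [List.foldl_cons, ih, runOr]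
    simp

/-- A's inner loop: the per-`j` OR-folds over `pyRange i (j+1) 1` form a running-OR list. -/
lemma a_inner (f : Int → Int) (i b : Int) : ∀ (a : Int), i ≤ a →
    (PySem.List.pyRange a b 1).map
        (fun j => ((PySem.List.pyRange i (j+1) 1).map f).foldl (fun fin v => Int.lor fin v) 0)
      = runOr (((PySem.List.pyRange i a 1).map f).foldl (fun fin v => Int.lor fin v) 0)
          ((PySem.List.pyRange a b 1).map f) := by
  intro a ha
  by_cases hab : a < b
  · generalize hm : (b - a).toNat = m
    induction m generalizing a with
    | zero => omega
    | succ m ih =>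
      rw [PySem.List.pyRange_one_cons hab]
      have hsucc : PySem.List.pyRange i (a+1) 1 = PySem.List.pyRange i a 1 ++ [a] :=
        PySem.List.pyRange_one_succ_right ha
      simp only [List.map_cons, runOr]
      have hhead : ((PySem.List.pyRange i (a+1) 1).map f).foldl (fun fin v => Int.lor fin v) 0
          = Int.lor (((PySem.List.pyRange i a 1).map f).foldl (fun fin v => Int.lor fin v) 0) (f a) := by
        rw [hsucc]; simp
      rw [hhead]
      congr 1
      by_cases h2 : a + 1 < b
      · rw [ih (a+1) (by omega) h2 (by omega), hhead]
      · rw [PySem.List.pyRange_one_eq_nil (by omega : b ≤ a + 1)]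
        simp [runOr]
  · rw [PySem.List.pyRange_one_eq_nil (by omega : b ≤ a)]
    simp [runOr]

/-- A fold whose step appends a per-element block is the flatMap of the blocks. -/
lemma foldl_block {α β : Type} (l : List α) (step : List β → α → List β)
    (h : α → List β) (hs : ∀ res i, i ∈ l → step res i = res ++ h i) :
    ∀ res, l.foldl step res = res ++ l.flatMap h := by
  induction l with
  | nil => intro res; simp
  | cons x xs ih =>
    intro res
    simp only [List.foldl_cons, List.flatMap_cons]
    rw [hs res x (by simp), ih (fun r i hi => hs r i (by simp [hi])), List.append_assoc]

/-- The common value of both programs. -/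
lemma solve_eq_alt (arr : List Int) : solve arr = solve_alt arr := by
  unfold solve solve_alt oR
  dsimp only
  -- B side
  rw [foldl_block (PySem.List.pyRange 0 (arr.length : Int) 1) _
        (fun i => runOr 0 ((PySem.List.pyRange i (arr.length : Int) 1).map
                    (fun k => PySem.List.pyGetD arr k 0)))
        (by
          intro res i _
          dsimp only
          rw [← b_inner, List.foldl_map])]
  -- A side: flatten cont_sub
  rw [foldl_block (PySem.List.pyRange 0 (arr.length : Int) 1) _
        (fun i => (PySem.List.pyRange i (arr.length : Int) 1).map
            (fun j => (PySem.List.pyRange i (j+1) 1).map (fun k => PySem.List.pyGetD arr k 0)))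
        (by
          intro cs i _
          dsimp only
          rw [PySem.List.foldl_append_singleton_eq_map]
          congr 1
          apply List.map_congr_left
          intro j _
          rw [PySem.List.foldl_append_singleton_eq_map, List.nil_append])]
  rw [PySem.List.foldl_append_singleton_eq_map, List.nil_append, List.nil_append,
      List.nil_append, List.map_flatMap]
  apply List.flatMap_congr
  intro i _
  rw [List.map_map]
  have h := a_inner (fun k => PySem.List.pyGetD arr k 0) i (arr.length : Int) i (le_refl i)
  rw [Function.comp_def, h, PySem.List.pyRange_one_eq_nil (le_refl i)]
  simp

-- ===== VERDICT (by name: the statement is the Claim_ definition above) =====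
theorem solve_spec : Claim_equal_solve := by
  intro arr _
  unfold Spec_solve
  exact solve_eq_alt arr
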